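-- pv_equiv track=rewrite | github.com/CroP-BioDiv/zcitools | zci_bio/chloroplast/analyse.py | _ns_parts
-- ===== SOURCE A (Python) =====
-- def _ns_parts(sequences):
--     # ToDo: faster
--     ns = []
--     for i, c in enumerate(sequences):
--         if c == 'N':
--             if ns and ns[-1][1] == i:
--                 ns[-1][1] += 1
--             else:
--                 ns.append([i, i + 1])
--     return ns
-- ===== SOURCE B (Python) =====
-- def _ns_parts(sequences):
--     # Run-length decomposition: scan maximal runs of equal characters and
--     # emit one [start, end) interval per run of 'N'.
--     seq = list(sequences)
--     n = len(seq)
--     ns = []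
--     i = 0
--     while i < n:
--         c = seq[i]
--         j = i + 1
--         while j < n and seq[j] == c:
--             j += 1
--         if c == 'N':
--             ns.append([i, j])
--         i = j
--     return ns
-- ===== Notes on version B (the rewrite author's own statement) =====
-- stated objective: alternative
-- what changed: Replaces the per-character extend-or-append state machine (which re-inspects the last emitted interval at every 'N') by a run-length scan that jumps over each maximal run of equal characters and emits exactly one [start, end) interval per run of 'N'.
import Mathlib
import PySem

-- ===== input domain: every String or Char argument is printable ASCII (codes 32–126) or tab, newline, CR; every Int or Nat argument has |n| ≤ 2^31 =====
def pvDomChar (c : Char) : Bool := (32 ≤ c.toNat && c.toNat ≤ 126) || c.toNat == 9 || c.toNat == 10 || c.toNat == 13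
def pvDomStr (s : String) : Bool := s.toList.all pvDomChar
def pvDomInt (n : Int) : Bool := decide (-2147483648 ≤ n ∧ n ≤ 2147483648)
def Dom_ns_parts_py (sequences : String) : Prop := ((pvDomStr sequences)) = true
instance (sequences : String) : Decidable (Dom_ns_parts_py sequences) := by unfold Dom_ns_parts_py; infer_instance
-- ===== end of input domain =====

-- B replaces A's per-character extend-or-append state machine by a run-length
-- scan over maximal runs of equal characters (alternative decomposition, same cost).

-- ===== PORT A =====
-- Loop body of A: for i, c in enumerate(sequences).  The elements of `ns` are
-- always two-element lists [start, end] built by this very function, so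
-- `ns[-1][1]` is `last.getD 1 0` and the in-place `ns[-1][1] += 1` is
-- replacing the last element.
def nsStep (ns : List (List Int)) (ic : Int × Char) : List (List Int) :=
  if ic.2 = 'N' then
    match ns.getLast? with
    | some last =>
      if last.getD 1 0 = ic.1 then
        ns.dropLast ++ [[last.getD 0 0, last.getD 1 0 + 1]]
      else ns ++ [[ic.1, ic.1 + 1]]
    | none => ns ++ [[ic.1, ic.1 + 1]]
  else ns

def ns_parts_py (sequences : String) : List (List Int) :=
  (PySem.List.enumerate sequences.toList 0).foldl nsStep []

-- ===== PORT B =====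
-- Source B's outer while loop: each step consumes one maximal run of equal
-- characters (the inner `while j < n and seq[j] == c` is the takeWhile/dropWhile
-- split of the remainder) and emits [i, j] when the run is of 'N'.
def nsRuns (idx : Int) : List Char → List (List Int)
  | [] => []
  | c :: rest =>
    let grp := rest.takeWhile (· == c)
    let tail := rest.dropWhile (· == c)
    let len : Int := 1 + (grp.length : Int)
    if c = 'N' then [idx, idx + len] :: nsRuns (idx + len) tail
    else nsRuns (idx + len) tail
  termination_by l => l.length
  decreasing_by
    all_goals
      simp only [List.length_cons]
      exact Nat.lt_succ_of_le (List.length_dropWhile_le _ _)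

def ns_parts_py_alt (sequences : String) : List (List Int) :=
  nsRuns 0 sequences.toList

-- ===== PRECONDITION & SPEC =====
def Spec_ns_parts_py (sequences : String) (out : List (List Int)) : Prop := out = ns_parts_py_alt sequences
instance (sequences : String) (out : List (List Int)) : Decidable (Spec_ns_parts_py sequences out) := by unfold Spec_ns_parts_py; infer_instance

-- ===== CLAIM (what is proved, stated in full; the proofs are below) =====
def Claim_equal_ns_parts_py : Prop := ∀ (sequences : String), Dom_ns_parts_py sequences → Spec_ns_parts_py sequences (ns_parts_py sequences)

-- ===== LEMMAS AND PROOFS =====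

-- the head of a dropWhile fails the predicate
theorem dropWhile_head_false {α : Type} (p : α → Bool) :
    ∀ (l : List α) {d : α} {t : List α}, l.dropWhile p = d :: t → p d = false := by
  intro l
  induction l with
  | nil => intro d t h; simp [List.dropWhile] at h
  | cons x xs ih =>
    intro d t h
    by_cases hx : p x = true
    · rw [List.dropWhile_cons_of_pos hx] at h; exact ih h
    · rw [List.dropWhile_cons_of_neg hx] at h
      cases h; simpa using hx

theorem nsRuns_skip (c : Char) (rest : List Char) (i : Int) (hc : c ≠ 'N') :
    nsRuns i (c :: rest) = nsRuns (i + 1) rest := by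
  cases rest with
  | nil => simp [nsRuns, hc]
  | cons d rest' =>
    by_cases hd : d = c
    · subst hd
      rw [nsRuns, nsRuns]
      simp only [List.takeWhile_cons, List.dropWhile_cons, BEq.rfl, if_true,
        if_neg hc, List.length_cons]
      congr 1
      push_cast
      ring
    · rw [nsRuns]
      simp only [List.takeWhile_cons, List.dropWhile_cons,
        if_neg (by simpa using hd : ¬ (d == c) = true), if_neg hc, List.length_nil]
      norm_num

theorem foldA_run (rest : List Char) : ∀ (ns : List (List Int)) (s i : Int),
    (PySem.List.enumerate rest i).foldl nsStep (ns ++ [[s, i]]) =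
      (PySem.List.enumerate (rest.dropWhile (· == 'N'))
          (i + ((rest.takeWhile (· == 'N')).length : Int))).foldl nsStep
        (ns ++ [[s, i + ((rest.takeWhile (· == 'N')).length : Int)]]) := by
  induction rest with
  | nil => intro ns s i; simp [PySem.List.enumerate]
  | cons c rest' ih =>
    intro ns s i
    by_cases hc : c = 'N'
    · subst hc
      rw [PySem.List.enumerate_cons, List.foldl_cons]
      have hstep : nsStep (ns ++ [[s, i]]) (i, 'N') = ns ++ [[s, i + 1]] := by
        simp [nsStep]
      rw [hstep, ih ns s (i + 1)]
      simp only [List.takeWhile_cons, List.dropWhile_cons, BEq.rfl, if_true, List.length_cons]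
      have h1 : i + (((rest'.takeWhile (· == 'N')).length : Nat) + 1 : Nat) =
          i + 1 + ((rest'.takeWhile (· == 'N')).length : Int) := by push_cast; ring
      rw [h1]
    · simp only [List.takeWhile_cons, List.dropWhile_cons,
        if_neg (by simpa using hc : ¬ (c == 'N') = true), List.length_nil]
      norm_num

theorem foldA_eq_runs : ∀ (l : List Char) (i : Int) (ns : List (List Int)),
    (∀ last, ns.getLast? = some last → last.getD 1 0 < i) →
    (PySem.List.enumerate l i).foldl nsStep ns = ns ++ nsRuns i l
  | [], i, ns, _ => by simp [nsRuns, PySem.List.enumerate]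
  | c :: rest, i, ns, hinv => by
      rw [PySem.List.enumerate_cons, List.foldl_cons]
      by_cases hc : c = 'N'
      · subst hc
        have hstep : nsStep ns (i, 'N') = ns ++ [[i, i + 1]] := by
          unfold nsStep
          cases hlast : ns.getLast? with
          | none => simp
          | some last =>
            have hlt := hinv last hlast
            simp only [List.getD] at hlt
            simp
            omega
        rw [hstep, foldA_run rest ns i (i + 1)]
        set k : Int := ((rest.takeWhile (· == 'N')).length : Int) with hk
        have hrhs : nsRuns i ('N' :: rest) =
            [i, i + 1 + k] :: nsRuns (i + 1 + k) (rest.dropWhile (· == 'N')) := by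
          rw [nsRuns]
          have : i + (1 + k) = i + 1 + k := by ring
          rw [this]
          simp
        rw [hrhs]
        cases hdw : rest.dropWhile (· == 'N') with
        | nil => simp [PySem.List.enumerate, nsRuns]
        | cons d dw' =>
          have hd : d ≠ 'N' := by
            have := dropWhile_head_false (· == 'N') rest hdw
            simpa using this
          rw [PySem.List.enumerate_cons, List.foldl_cons]
          have hstep2 : nsStep (ns ++ [[i, i + 1 + k]]) (i + 1 + k, d) = ns ++ [[i, i + 1 + k]] := by
            simp [nsStep, hd]
          rw [hstep2]
          rw [foldA_eq_runs dw' (i + 1 + k + 1) (ns ++ [[i, i + 1 + k]])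
            (by intro last hlast; simp at hlast; subst hlast; simp)]
          rw [nsRuns_skip d dw' (i + 1 + k) hd]
          simp
      · have hstep : nsStep ns (i, c) = ns := by simp [nsStep, hc]
        rw [hstep, foldA_eq_runs rest (i + 1) ns
          (by intro last hlast; have := hinv last hlast; omega)]
        rw [nsRuns_skip c rest i hc]
  termination_by l => l.length
  decreasing_by
    · have h1 : (d :: dw').length ≤ rest.length := by
        rw [← hdw]; exact List.length_dropWhile_le _ _
      simp at h1 ⊢; omega
    · simp

-- ===== VERDICT (by name: the statement is the Claim_ definition above) =====
theorem ns_parts_py_spec : Claim_equal_ns_parts_py := by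
  intro s _
  unfold Spec_ns_parts_py ns_parts_py ns_parts_py_alt
  rw [foldA_eq_runs s.toList 0 [] (by intro last h; simp at h)]
  simp
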